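-- pv_equiv track=rewrite | github.com/Y3drk/ASD_2021 | ASD_kolosy/przejscie_po_liczbach.py | find_cost
-- ===== SOURCE A (Python) =====
-- def find_cost(P):
--     # tu prosze wpisac wlasna implementacje
--     P.sort()  #O(nlogn)
--     n = len(P)
--     F = [float('inf') for _ in range(n)]
--     Checker = [[True]*n for i in range(n)] # tablica sprawdzajaca czy mozemy przeskoczyc z danej pozycji na inna
--
--     for i in range(n):   #uzupełnienie tablicy Checker  O(n^2)
--         for j in range(i + 1,n):
--             res = checker(P[i],P[j])
--             Checker[i][j] = res
--             Checker[j][i] = res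
--
--     F[0] = 0
--     for a in range(1,n):
--         for b in range(a):
--             if Checker[a][b]:
--                 F[a] = min (F[a], F[b] + abs(P[a] - P[b]))
--     if F[n-1] == float('inf'):
--         return -1
--     else:
--         return F[n-1]
--
-- def checker(num1, num2):
--     t1, t2 = [], []
--     while num1 > 0:
--         t1 += [num1%10]
--         num1 //= 10
--
--     while num2 > 0:
--         t2 += [num2%10]
--         num2 //= 10
--
--     t1.sort()
--     t2.sort()
--     i, j = 0, 0
--     while i < len(t1) and j < len(t2):
--         if t1[i] < t2[j]:
--             i += 1
--         elif t1[i] > t2[j]: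
--             j += 1
--
--         else:
--             return True
--
--     return False
-- ===== SOURCE B (Python) =====
-- # Bucket DP: instead of the O(n^2) pairwise digit-check table, keep for each digit d
-- # the best F[b] - P[b] over processed positions b whose value contains digit d.
-- # Like A, sorts P in place (same observable mutation). O(n log n).
--
-- def _digits(x):
--     ds = set()
--     while x > 0:
--         ds.add(x % 10)
--         x //= 10
--     return ds
--
-- def find_cost(P):
--     P.sort()
--     best = {}  # digit -> min F[b] - P[b] over reachable processed b containing digit
--     F = None
--     for idx, x in enumerate(P):
--         ds = _digits(x)
--         if idx == 0:
--             F = 0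
--         else:
--             cands = [best[d] for d in ds if d in best]
--             F = min(cands) + x if cands else None
--         if F is not None:
--             for d in ds:
--                 v = F - x
--                 if d not in best or v < best[d]:
--                     best[d] = v
--     return F if F is not None else -1
-- ===== Notes on version B (the rewrite author's own statement) =====
-- stated objective: faster
-- what changed: Replaces A's O(n^2) pairwise digit-intersection Checker table and O(n^2) DP inner scan by a single left-to-right pass over the sorted list that keeps, for each digit 0-9, the best F[b]-P[b] seen so far, so each element is processed via its <=10 digit buckets.
-- crash fix: On the empty list A raises IndexError (it assigns into an empty DP array); B's loop never runs and it returns -1. — e.g. on find_cost([]): A raises IndexError, B returns -1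
import Mathlib
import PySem

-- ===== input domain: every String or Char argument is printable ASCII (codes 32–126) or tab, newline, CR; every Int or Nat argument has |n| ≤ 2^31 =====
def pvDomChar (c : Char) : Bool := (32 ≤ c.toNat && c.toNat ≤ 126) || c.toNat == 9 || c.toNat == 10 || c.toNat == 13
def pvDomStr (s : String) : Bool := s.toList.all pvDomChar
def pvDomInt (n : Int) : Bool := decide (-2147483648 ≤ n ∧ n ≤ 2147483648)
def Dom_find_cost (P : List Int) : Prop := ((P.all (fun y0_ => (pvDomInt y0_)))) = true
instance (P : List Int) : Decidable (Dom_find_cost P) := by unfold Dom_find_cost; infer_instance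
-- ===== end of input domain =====

-- B replaces A's O(n^2) pairwise digit-check table and O(n^2) DP by a per-digit bucket DP
-- (best F[b]-P[b] per digit 0-9), measured faster (asymptotic change). Both Pythons sort P
-- in place; the equivalence proved here is about the RETURN value only.

-- ===== PORT A =====

-- termination measure fact for the digit loops (cited by name in decreasing_by)
theorem pvDigits_dec (num : Int) (h : 0 < num) :
    (PySem.Int.floordiv num 10).toNat < num.toNat := by
  have hnum : num = ((num.toNat : Nat) : Int) := (Int.toNat_of_nonneg (by omega)).symm
  have h10 : (10 : Int) = ((10 : Nat) : Int) := rfl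
  rw [hnum, h10, PySem.Int.floordiv_natCast num.toNat 10, Int.toNat_natCast, Int.toNat_natCast]
  exact Nat.div_lt_self (by omega) (by decide)

-- the two 'while num > 0' digit-extraction loops of checker (least-significant digit first)
def pvDigits (num : Int) : List Int :=
  if h : 0 < num then PySem.Int.mod num 10 :: pvDigits (PySem.Int.floordiv num 10) else []
termination_by num.toNat
decreasing_by exact pvDigits_dec num h

-- the merge-scan 'while i < len(t1) and j < len(t2)' of checker (i, j start at 0 and only
-- grow, so they are carried as Nat; exact)
def pvMerge (t1 t2 : List Int) (i j : Nat) : Bool :=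
  if h : i < t1.length ∧ j < t2.length then
    if t1[i] < t2[j] then pvMerge t1 t2 (i + 1) j
    else if t2[j] < t1[i] then pvMerge t1 t2 i (j + 1)
    else true
  else false
termination_by (t1.length - i) + (t2.length - j)
decreasing_by
  · exact Nat.add_lt_add_right (Nat.sub_succ_lt_self _ _ h.1) _
  · exact Nat.add_lt_add_left (Nat.sub_succ_lt_self _ _ h.2) _

-- checker(num1, num2)
def pvChecker (num1 num2 : Int) : Bool :=
  pvMerge (PySem.List.sorted (pvDigits num1) (fun x => x))
          (PySem.List.sorted (pvDigits num2) (fun x => x)) 0 0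

-- Checker[i][j] = res; Checker[j][i] = res
def pvSet2 (C : List (List Bool)) (i j : Nat) (res : Bool) : List (List Bool) :=
  let C1 := C.set i ((C.getD i []).set j res)
  C1.set j ((C1.getD j []).set i res)

-- the double loop filling the Checker table (range indices are nonnegative: carried as Nat; exact)
def pvFill (P : List Int) (n : Nat) : List (List Bool) :=
  (List.range n).foldl
    (fun C i =>
      (List.range' (i + 1) (n - (i + 1))).foldl
        (fun C j => pvSet2 C i j (pvChecker (P.getD i 0) (P.getD j 0))) C)
    (List.replicate n (List.replicate n true))

-- float('inf') is only ever compared with / added to ints and returned through the final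
-- '== float("inf")' test, so it is modelled exactly by `none` with these two operations
def omin : Option Int → Option Int → Option Int
  | none, b => b
  | some x, none => some x
  | some x, some y => some (min x y)

def oadd (a : Option Int) (c : Int) : Option Int := a.map (· + c)

def find_cost (P : List Int) : Int :=
  let S := PySem.List.sorted P (fun x => x)
  let n := S.length
  let C := pvFill S n
  let F0 : List (Option Int) := (List.replicate n (none : Option Int)).set 0 (some 0)
  let F := (List.range' 1 (n - 1)).foldl
    (fun F a =>
      (List.range a).foldl
        (fun F b =>
          if (C.getD a []).getD b true then
            F.set a (omin (F.getD a none) (oadd (F.getD b none) |S.getD a 0 - S.getD b 0|))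
          else F) F) F0
  match F.getD (n - 1) none with
  | none => -1
  | some v => v

-- ===== PORT B =====

-- _digits(x): the while loop building the digit set
def altDigitsAux (x : Int) (acc : PySem.Set Int) : PySem.Set Int :=
  if h : 0 < x then altDigitsAux (PySem.Int.floordiv x 10) (PySem.Set.add acc (PySem.Int.mod x 10)) else acc
termination_by x.toNat
decreasing_by exact pvDigits_dec x h

def altDigits (x : Int) : PySem.Set Int := altDigitsAux x PySem.Set.empty

-- the per-digit bucket update 'if d not in best or v < best[d]: best[d] = v'
def altUpd (v : Int) (best : PySem.Dict Int Int) (d : Int) : PySem.Dict Int Int :=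
  match best.get? d with
  | none => best.insert d v
  | some w => if v < w then best.insert d v else best

def find_cost_alt (P : List Int) : Int :=
  let S := PySem.List.sorted P (fun x => x)
  -- state: (best buckets, F of the element just processed; None = unreachable)
  let res := (PySem.List.enumerate S 0).foldl
    (fun (st : PySem.Dict Int Int × Option Int) (ix : Int × Int) =>
      let best := st.1
      let ds := altDigits ix.2
      let F : Option Int :=
        if ix.1 = 0 then some 0
        else
          -- [best[d] for d in ds if d in best]; min over it is set-iteration-order independent
          match PySem.List.min? (ds.filterMap (fun d => best.get? d)) (fun v => v) with
          | some m => some (m + ix.2)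
          | none => none
      match F with
      | none => (best, none)
      | some f => (ds.foldl (altUpd (f - ix.2)) best, some f))
    ((PySem.Dict.empty : PySem.Dict Int Int), (none : Option Int))
  match res.2 with
  | none => -1
  | some v => v

-- ===== PRECONDITION & SPEC =====
-- A's assignment of 0 into the DP array raises IndexError on the empty list: Pre_ excludes exactly P = [].
def Pre_find_cost (P : List Int) : Prop := P ≠ []
instance (P : List Int) : Decidable (Pre_find_cost P) := by unfold Pre_find_cost; infer_instance
def pvWitness_find_cost : List Int := [12, 5, 21, 300]

-- On the empty list A raises IndexError (it assigns into an empty DP array); B's loop never runs and returns -1.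
def Raises_find_cost (P : List Int) : Prop := P = []
instance (P : List Int) : Decidable (Raises_find_cost P) := by unfold Raises_find_cost; infer_instance
def pvRaiseWitness_find_cost : List Int := []
def pvRaiseWitnessOut_find_cost : Int := -1

def Spec_find_cost (P : List Int) (out : Int) : Prop := out = find_cost_alt P
instance (P : List Int) (out : Int) : Decidable (Spec_find_cost P out) := by unfold Spec_find_cost; infer_instance

-- ===== CLAIM (what is proved, stated in full; the proofs are below) =====
def Claim_equal_find_cost : Prop := ∀ (P : List Int), Dom_find_cost P → Pre_find_cost P → Spec_find_cost P (find_cost P)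
def Claim_raises_find_cost : Prop := (∀ (P : List Int), Dom_find_cost P → Raises_find_cost P → ¬ Pre_find_cost P) ∧ (Dom_find_cost (pvRaiseWitness_find_cost) ∧ Raises_find_cost (pvRaiseWitness_find_cost) ∧ find_cost_alt (pvRaiseWitness_find_cost) = pvRaiseWitnessOut_find_cost)

-- ===== LEMMAS AND PROOFS =====

-- ---- omin / oadd algebra ----
theorem omin_none_right (a : Option Int) : omin a none = a := by cases a <;> rfl
theorem omin_none_left (a : Option Int) : omin none a = a := rfl
theorem omin_comm (a b : Option Int) : omin a b = omin b a := by
  cases a <;> cases b <;> simp [omin, min_comm]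
theorem omin_assoc (a b c : Option Int) : omin (omin a b) c = omin a (omin b c) := by
  cases a <;> cases b <;> cases c <;> simp [omin, min_assoc]
theorem omin_idem_right (a : Option Int) (c : Int) :
    omin (omin a (some c)) (some c) = omin a (some c) := by
  cases a <;> simp [omin]
theorem oadd_none (c : Int) : oadd none c = none := rfl
theorem oadd_some (v c : Int) : oadd (some v) c = some (v + c) := rfl
theorem oadd_omin (a b : Option Int) (c : Int) : oadd (omin a b) c = omin (oadd a c) (oadd b c) := by
  cases a <;> cases b <;> simp [omin, oadd, min_add_add_right]

-- fold of omin with a general init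
theorem ominFold_init {α : Type} (f : α → Option Int) (l : List α) (init : Option Int) :
    l.foldl (fun acc d => omin acc (f d)) init
      = omin init (l.foldl (fun acc d => omin acc (f d)) none) := by
  induction l generalizing init with
  | nil => simp [omin_none_right]
  | cons d l ih =>
    simp only [List.foldl_cons, omin_none_left]
    rw [ih (omin init (f d)), ih (f d), omin_assoc]

-- ---- digits ----
theorem mem_altDigitsAux (x : Int) (acc : PySem.Set Int) (d : Int) :
    d ∈ altDigitsAux x acc ↔ d ∈ acc ∨ d ∈ pvDigits x := by
  induction x, acc using altDigitsAux.induct with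
  | case1 x acc h ih =>
    rw [altDigitsAux, pvDigits]
    simp only [h, dif_pos, if_pos, ih, PySem.Set.mem_add, List.mem_cons]
    tauto
  | case2 x acc h =>
    rw [altDigitsAux, pvDigits]
    simp [h]

theorem mem_altDigits (x d : Int) : d ∈ altDigits x ↔ d ∈ pvDigits x := by
  rw [altDigits, mem_altDigitsAux]
  simp [PySem.Set.empty]

-- ---- checker = "some common digit" ----
theorem drop_head_le (l : List Int) (hs : l.Pairwise (· ≤ ·)) (j : Nat) (hj : j < l.length)
    (v : Int) (hv : v ∈ l.drop j) : l[j] ≤ v := by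
  rw [List.drop_eq_getElem_cons hj] at hv
  rcases List.mem_cons.mp hv with rfl | hv
  · exact le_refl _
  · have hp := hs.drop (i := j)
    rw [List.drop_eq_getElem_cons hj] at hp
    exact (List.pairwise_cons.mp hp).1 v hv

theorem pvMerge_spec (t1 t2 : List Int) (h1 : t1.Pairwise (· ≤ ·)) (h2 : t2.Pairwise (· ≤ ·))
    (i j : Nat) :
    pvMerge t1 t2 i j = decide (∃ v, v ∈ t1.drop i ∧ v ∈ t2.drop j) := by
  induction i, j using pvMerge.induct t1 t2 with
  | case1 i j h hlt ih =>
    rw [pvMerge]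
    simp only [h, hlt, dif_pos, if_pos, ih]
    apply decide_eq_decide.mpr
    constructor
    · rintro ⟨v, hv1, hv2⟩
      refine ⟨v, ?_, hv2⟩
      rw [List.drop_eq_getElem_cons h.1]
      exact List.mem_cons_of_mem _ hv1
    · rintro ⟨v, hv1, hv2⟩
      rw [List.drop_eq_getElem_cons h.1] at hv1
      rcases List.mem_cons.mp hv1 with rfl | hv1
      · exact absurd (drop_head_le t2 h2 j h.2 _ hv2) (by omega)
      · exact ⟨v, hv1, hv2⟩
  | case2 i j h hlt hgt ih =>
    rw [pvMerge]
    simp only [h, hlt, hgt, dif_pos, if_neg, if_pos, ih]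
    apply decide_eq_decide.mpr
    constructor
    · rintro ⟨v, hv1, hv2⟩
      refine ⟨v, hv1, ?_⟩
      rw [List.drop_eq_getElem_cons h.2]
      exact List.mem_cons_of_mem _ hv2
    · rintro ⟨v, hv1, hv2⟩
      rw [List.drop_eq_getElem_cons h.2] at hv2
      rcases List.mem_cons.mp hv2 with rfl | hv2
      · exact absurd (drop_head_le t1 h1 i h.1 _ hv1) (by omega)
      · exact ⟨v, hv1, hv2⟩
  | case3 i j h hlt hgt =>
    rw [pvMerge]
    simp only [h, hlt, hgt, dif_pos, if_neg]
    have heq : t1[i]'h.1 = t2[j]'h.2 := by omega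
    have hw : ∃ v, v ∈ t1.drop i ∧ v ∈ t2.drop j := by
      refine ⟨t1[i]'h.1, ?_, ?_⟩
      · rw [List.drop_eq_getElem_cons h.1]; exact List.mem_cons_self
      · rw [List.drop_eq_getElem_cons h.2, heq]; exact List.mem_cons_self
    simp [hw]
  | case4 i j h =>
    rw [pvMerge]
    simp only [h, dif_neg]
    have hd : t1.drop i = [] ∨ t2.drop j = [] := by
      rcases Nat.lt_or_ge i t1.length with hi | hi
      · exact Or.inr (List.drop_eq_nil_of_le (by omega))
      · exact Or.inl (List.drop_eq_nil_of_le hi)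
    rcases hd with hd | hd <;> simp [hd]

theorem pvChecker_spec (x y : Int) :
    pvChecker x y = decide (∃ d, d ∈ pvDigits x ∧ d ∈ pvDigits y) := by
  rw [pvChecker, pvMerge_spec _ _ (PySem.List.sorted_pairwise _ _) (PySem.List.sorted_pairwise _ _)]
  simp [PySem.List.mem_sorted]

-- ---- the spec recurrence G: A's F array value at each position of the sorted list ----
def pvG (S : List Int) : Nat → Option Int
  | 0 => some 0
  | a + 1 =>
    (List.range (a + 1)).attach.foldl
      (fun acc b =>
        if pvChecker (S.getD b.1 0) (S.getD (a + 1) 0) then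
          omin acc (oadd (pvG S b.1) |S.getD (a + 1) 0 - S.getD b.1 0|)
        else acc) none
decreasing_by
  have := List.mem_range.mp b.2
  omega

theorem pvG_succ (S : List Int) (a : Nat) :
    pvG S (a + 1) = (List.range (a + 1)).foldl
      (fun acc b =>
        if pvChecker (S.getD b 0) (S.getD (a + 1) 0) then
          omin acc (oadd (pvG S b) |S.getD (a + 1) 0 - S.getD b 0|)
        else acc) none := by
  rw [pvG]
  exact List.foldl_attach (f := fun acc b =>
    if pvChecker (S.getD b 0) (S.getD (a + 1) 0) then
      omin acc (oadd (pvG S b) |S.getD (a + 1) 0 - S.getD b 0|)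
    else acc)

-- ---- A-side: the Checker table ----
-- entry and shape of the Checker matrix
def pvE (C : List (List Bool)) (a b : Nat) : Bool := (C.getD a []).getD b true
def pvShape (n : Nat) (C : List (List Bool)) : Prop := C.length = n ∧ ∀ r ∈ C, r.length = n

theorem getD_set_self {α : Type} (l : List α) (i : Nat) (v d : α) (h : i < l.length) :
    (l.set i v).getD i d = v := by
  simp [List.getD_eq_getElem?_getD, List.getElem?_set, h]

theorem getD_set_ne {α : Type} (l : List α) (i k : Nat) (v d : α) (h : k ≠ i) :
    (l.set i v).getD k d = l.getD k d := by
  simp [List.getD_eq_getElem?_getD, List.getElem?_set, (Ne.symm h : i ≠ k)]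

theorem getD_mem {α : Type} (l : List α) (i : Nat) (d : α) (h : i < l.length) :
    l.getD i d ∈ l := by
  rw [List.getD_eq_getElem?_getD, List.getElem?_eq_getElem h]
  simpa using List.getElem_mem h

theorem pvSet2_shape (n : Nat) (C : List (List Bool)) (hS : pvShape n C) (i j : Nat)
    (hi : i < n) (hj : j < n) (r : Bool) : pvShape n (pvSet2 C i j r) := by
  obtain ⟨hlen, hrow⟩ := hS
  have hleni : (C.getD i []).length = n := hrow _ (getD_mem _ _ _ (by omega))
  refine ⟨by simp [pvSet2, hlen], ?_⟩
  intro row hr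
  unfold pvSet2 at hr
  rcases List.mem_or_eq_of_mem_set hr with hr' | rfl
  · rcases List.mem_or_eq_of_mem_set hr' with hr'' | rfl
    · exact hrow _ hr''
    · rw [List.length_set]; exact hleni
  · rw [List.length_set]
    set C1 := C.set i ((C.getD i []).set j r) with hC1
    have hC1j : C1.getD j [] ∈ C1 := getD_mem _ _ _ (by rw [hC1, List.length_set]; omega)
    rcases List.mem_or_eq_of_mem_set hC1j with h' | h'
    · exact hrow _ h'
    · rw [h', List.length_set]; exact hleni

theorem pvE_set (C : List (List Bool)) (p : Nat) (row : List Bool) (hp : p < C.length)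
    (a b : Nat) :
    pvE (C.set p row) a b = if a = p then row.getD b true else pvE C a b := by
  unfold pvE
  by_cases h : a = p
  · subst h; rw [getD_set_self _ _ _ _ hp, if_pos rfl]
  · rw [getD_set_ne _ _ _ _ _ h, if_neg h]

theorem pvSet2_entry (n : Nat) (C : List (List Bool)) (hS : pvShape n C) (i j a b : Nat)
    (hi : i < n) (hj : j < n) (hij : i ≠ j) (r : Bool) :
    pvE (pvSet2 C i j r) a b = if (a = i ∧ b = j) ∨ (a = j ∧ b = i) then r else pvE C a b := by
  obtain ⟨hlen, hrow⟩ := hS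
  have hleni : (C.getD i []).length = n := hrow _ (getD_mem _ _ _ (by omega))
  show pvE ((C.set i ((C.getD i []).set j r)).set j
      (((C.set i ((C.getD i []).set j r)).getD j []).set i r)) a b = _
  set C1 := C.set i ((C.getD i []).set j r) with hC1
  have hC1len : C1.length = n := by simp [hC1, hlen]
  have hC1j : C1.getD j [] ∈ C1 := getD_mem _ _ _ (by omega)
  have hlenj : (C1.getD j []).length = n := by
    rcases List.mem_or_eq_of_mem_set hC1j with h' | h'
    · exact hrow _ h'
    · rw [h', List.length_set]; exact hleni
  have hE1 : ∀ a' b', pvE C1 a' b' = if a' = i then ((C.getD i []).set j r).getD b' true else pvE C a' b' := by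
    intro a' b'; exact pvE_set C i _ (by omega) a' b'
  rw [pvE_set C1 j _ (by omega) a b]
  by_cases haj : a = j
  · subst haj
    by_cases hbi : b = i
    · subst hbi
      rw [getD_set_self _ _ _ _ (by omega), if_pos (Or.inr ⟨rfl, rfl⟩), if_pos rfl]
    · rw [if_pos rfl, getD_set_ne _ _ _ _ _ hbi]
      have hrfl : (C1.getD a []).getD b true = pvE C1 a b := rfl
      rw [hrfl, hE1 a b, if_neg (by omega), if_neg (by rintro (⟨h1, h2⟩ | ⟨h1, h2⟩) <;> omega)]
  · rw [if_neg haj, hE1 a b]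
    by_cases hai : a = i
    · subst hai
      rw [if_pos rfl]
      by_cases hbj : b = j
      · subst hbj
        rw [getD_set_self _ _ _ _ (by omega), if_pos (Or.inl ⟨rfl, rfl⟩)]
      · rw [getD_set_ne _ _ _ _ _ hbj, if_neg (by rintro (⟨h1, h2⟩ | ⟨h1, h2⟩) <;> omega)]
        rfl
    · rw [if_neg hai, if_neg (by rintro (⟨h1, h2⟩ | ⟨h1, h2⟩) <;> omega)]

-- target entry values during the fill: rows < i done, row i done up to column m
def pvg (S : List Int) (i m a b : Nat) : Bool :=
  if a ≠ b ∧ (min a b < i ∨ (min a b = i ∧ max a b < m)) then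
    pvChecker (S.getD (min a b) 0) (S.getD (max a b) 0)
  else true

theorem pvFill_inner (S : List Int) (n i : Nat) (hi : i < n) :
    ∀ (cnt s : Nat), i < s → s + cnt ≤ n → ∀ C : List (List Bool), pvShape n C →
    (∀ a b, a < n → b < n → pvE C a b = pvg S i s a b) →
    pvShape n ((List.range' s cnt).foldl
        (fun C j => pvSet2 C i j (pvChecker (S.getD i 0) (S.getD j 0))) C) ∧
    (∀ a b, a < n → b < n →
      pvE ((List.range' s cnt).foldl
        (fun C j => pvSet2 C i j (pvChecker (S.getD i 0) (S.getD j 0))) C) a b = pvg S i (s + cnt) a b) := by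
  intro cnt
  induction cnt with
  | zero => intro s his hs C hSh hE; simpa using ⟨hSh, hE⟩
  | succ cnt ih =>
    intro s his hs C hSh hE
    rw [List.range'_succ]
    simp only [List.foldl_cons]
    have hsn : s < n := by omega
    have hSh' := pvSet2_shape n C hSh i s hi hsn (pvChecker (S.getD i 0) (S.getD s 0))
    have hE' : ∀ a b, a < n → b < n →
        pvE (pvSet2 C i s (pvChecker (S.getD i 0) (S.getD s 0))) a b = pvg S i (s + 1) a b := by
      intro a b ha hb
      rw [pvSet2_entry n C hSh i s a b hi hsn (by omega) _, hE a b ha hb]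
      unfold pvg
      by_cases hcase : (a = i ∧ b = s) ∨ (a = s ∧ b = i)
      · rw [if_pos hcase]
        rcases hcase with ⟨rfl, rfl⟩ | ⟨rfl, rfl⟩
        · rw [if_pos ⟨by omega, Or.inr ⟨by omega, by omega⟩⟩,
            show min a b = a by omega, show max a b = b by omega]
        · rw [if_pos ⟨by omega, Or.inr ⟨by omega, by omega⟩⟩,
            show min a b = b by omega, show max a b = a by omega]
      · rw [if_neg hcase]
        by_cases hab : a ≠ b ∧ (min a b < i ∨ (min a b = i ∧ max a b < s))
        · rw [if_pos hab, if_pos ⟨hab.1, by rcases hab.2 with h | h; exact Or.inl h; exact Or.inr ⟨h.1, by omega⟩⟩]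
        · rw [if_neg hab, if_neg (by
            rintro ⟨hne, hmin | ⟨hmin, hmax⟩⟩
            · exact hab ⟨hne, Or.inl hmin⟩
            · by_cases hms : max a b < s
              · exact hab ⟨hne, Or.inr ⟨hmin, hms⟩⟩
              · have hmaxs : max a b = s := by omega
                apply hcase
                rcases Nat.le_total a b with hle | hle
                · exact Or.inl ⟨by omega, by omega⟩
                · exact Or.inr ⟨by omega, by omega⟩)]
    have := ih (s + 1) (by omega) (by omega) _ hSh' hE'
    simpa [Nat.add_assoc, Nat.add_comm 1 cnt] using this

theorem pvFill_outer (S : List Int) (n : Nat) :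
    ∀ (k : Nat), k ≤ n →
    pvShape n ((List.range k).foldl
      (fun C i => (List.range' (i + 1) (n - (i + 1))).foldl
        (fun C j => pvSet2 C i j (pvChecker (S.getD i 0) (S.getD j 0))) C)
      (List.replicate n (List.replicate n true))) ∧
    (∀ a b, a < n → b < n →
      pvE ((List.range k).foldl
        (fun C i => (List.range' (i + 1) (n - (i + 1))).foldl
          (fun C j => pvSet2 C i j (pvChecker (S.getD i 0) (S.getD j 0))) C)
        (List.replicate n (List.replicate n true))) a b = pvg S k (k + 1) a b) := by
  intro k
  induction k with
  | zero =>
    intro _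
    constructor
    · exact ⟨by simp, by intro r hr; simp [List.eq_of_mem_replicate hr]⟩
    · intro a b ha hb
      unfold pvE pvg
      simp only [List.range_zero, List.foldl_nil]
      rw [List.getD_replicate _ (by omega : a < n), List.getD_replicate _ (by omega : b < n),
        if_neg (by omega)]
  | succ k ih =>
    intro hk
    have ⟨hSh, hE⟩ := ih (by omega)
    rw [List.range_succ, List.foldl_append]
    simp only [List.foldl_cons, List.foldl_nil]
    have hE' : ∀ a b, a < n → b < n → pvE ((List.range k).foldl _ _) a b = pvg S k (k + 1) a b := hE
    have hstart : ∀ a b, a < n → b < n →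
        pvE ((List.range k).foldl
          (fun C i => (List.range' (i + 1) (n - (i + 1))).foldl
            (fun C j => pvSet2 C i j (pvChecker (S.getD i 0) (S.getD j 0))) C)
          (List.replicate n (List.replicate n true))) a b = pvg S k (k + 1) a b := hE
    have := pvFill_inner S n k (by omega) (n - (k + 1)) (k + 1) (by omega) (by omega) _ hSh hstart
    refine ⟨this.1, ?_⟩
    intro a b ha hb
    rw [this.2 a b ha hb]
    unfold pvg
    by_cases h1 : a ≠ b ∧ (min a b < k ∨ (min a b = k ∧ max a b < k + 1 + (n - (k + 1))))
    · rw [if_pos h1, if_pos ⟨h1.1, by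
        rcases h1.2 with h | h
        · exact Or.inl (by omega)
        · exact Or.inl (by omega)⟩]
    · rw [if_neg h1, if_neg (by
        rintro ⟨hne, hmin | ⟨hmin, hmax⟩⟩
        · have hmaxn : max a b < n := by omega
          by_cases hmk : min a b < k
          · exact h1 ⟨hne, Or.inl hmk⟩
          · exact h1 ⟨hne, Or.inr ⟨by omega, by omega⟩⟩
        · omega)]

theorem pvFill_spec (S : List Int) (n : Nat) (a b : Nat) (hb : b < a) (ha : a < n) :
    ((pvFill S n).getD a []).getD b true = pvChecker (S.getD b 0) (S.getD a 0) := by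
  have := (pvFill_outer S n n (le_refl n)).2 a b ha (by omega)
  have hE : pvE (pvFill S n) a b = pvg S n (n + 1) a b := this
  unfold pvE at hE
  rw [hE]
  unfold pvg
  rw [if_pos ⟨by omega, Or.inl (by omega)⟩,
    show min a b = b by omega, show max a b = a by omega]

-- ---- A-side: the DP loop computes pvG ----
theorem dpA_inner (S : List Int) (n : Nat) (C : List (List Bool)) (a : Nat) (ha : a < n)
    (hC : ∀ b, b < a → (C.getD a []).getD b true = pvChecker (S.getD b 0) (S.getD a 0)) :
    ∀ (m : Nat), m ≤ a → ∀ (F : List (Option Int)), F.length = n →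
    (∀ k, k < a → F.getD k none = pvG S k) →
    (((List.range m).foldl (fun F b =>
        if (C.getD a []).getD b true then
          F.set a (omin (F.getD a none) (oadd (F.getD b none) |S.getD a 0 - S.getD b 0|))
        else F) F).length = n) ∧
    (∀ k, k ≠ a → ((List.range m).foldl (fun F b =>
        if (C.getD a []).getD b true then
          F.set a (omin (F.getD a none) (oadd (F.getD b none) |S.getD a 0 - S.getD b 0|))
        else F) F).getD k none = F.getD k none) ∧
    (((List.range m).foldl (fun F b =>
        if (C.getD a []).getD b true then
          F.set a (omin (F.getD a none) (oadd (F.getD b none) |S.getD a 0 - S.getD b 0|))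
        else F) F).getD a none
      = (List.range m).foldl (fun acc b =>
          if pvChecker (S.getD b 0) (S.getD a 0) then
            omin acc (oadd (pvG S b) |S.getD a 0 - S.getD b 0|)
          else acc) (F.getD a none)) := by
  intro m
  induction m with
  | zero => intro _ F hF hFk; exact ⟨by simpa using hF, fun k _ => by simp, by simp⟩
  | succ m ih =>
    intro hm F hF hFk
    obtain ⟨ih1, ih2, ih3⟩ := ih (by omega) F hF hFk
    rw [List.range_succ, List.foldl_append, List.foldl_append, List.foldl_cons, List.foldl_cons,
      List.foldl_nil, List.foldl_nil]
    set F1 := (List.range m).foldl (fun F b =>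
        if (C.getD a []).getD b true then
          F.set a (omin (F.getD a none) (oadd (F.getD b none) |S.getD a 0 - S.getD b 0|))
        else F) F with hF1
    have hF1m : F1.getD m none = pvG S m := by rw [ih2 m (by omega)]; exact hFk m (by omega)
    rw [hC m (by omega)]
    by_cases hchk : pvChecker (S.getD m 0) (S.getD a 0) = true
    · rw [if_pos hchk, if_pos hchk]
      refine ⟨by rw [List.length_set]; exact ih1, ?_, ?_⟩
      · intro k hk
        rw [getD_set_ne _ _ _ _ _ hk]
        exact ih2 k hk
      · rw [getD_set_self _ _ _ _ (by omega), ih3, hF1m]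
    · rw [if_neg hchk, if_neg hchk]
      exact ⟨ih1, ih2, ih3⟩

theorem dpA_outer (S : List Int) (n : Nat) (C : List (List Bool))
    (hC : ∀ a b, b < a → a < n → (C.getD a []).getD b true = pvChecker (S.getD b 0) (S.getD a 0)) :
    ∀ (cnt t : Nat), 1 ≤ t → t + cnt ≤ n → ∀ F : List (Option Int), F.length = n →
    (∀ k, k < t → F.getD k none = pvG S k) → (∀ k, t ≤ k → F.getD k none = none) →
    (((List.range' t cnt).foldl (fun F a => (List.range a).foldl (fun F b =>
        if (C.getD a []).getD b true then
          F.set a (omin (F.getD a none) (oadd (F.getD b none) |S.getD a 0 - S.getD b 0|))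
        else F) F) F).length = n) ∧
    (∀ k, k < t + cnt → ((List.range' t cnt).foldl (fun F a => (List.range a).foldl (fun F b =>
        if (C.getD a []).getD b true then
          F.set a (omin (F.getD a none) (oadd (F.getD b none) |S.getD a 0 - S.getD b 0|))
        else F) F) F).getD k none = pvG S k) ∧
    (∀ k, t + cnt ≤ k → ((List.range' t cnt).foldl (fun F a => (List.range a).foldl (fun F b =>
        if (C.getD a []).getD b true then
          F.set a (omin (F.getD a none) (oadd (F.getD b none) |S.getD a 0 - S.getD b 0|))
        else F) F) F).getD k none = none) := by
  intro cnt
  induction cnt with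
  | zero =>
    intro t ht htn F hF hFlo hFhi
    simpa using ⟨hF, fun k hk => hFlo k hk, fun k hk => hFhi k hk⟩
  | succ cnt ih =>
    intro t ht htn F hF hFlo hFhi
    rw [List.range'_succ]
    simp only [List.foldl_cons]
    have hta : t < n := by omega
    obtain ⟨i1, i2, i3⟩ := dpA_inner S n C t hta (fun b hb => hC t b hb hta) t (le_refl t) F hF
      (fun k hk => hFlo k hk)
    set F1 := (List.range t).foldl (fun F b =>
        if (C.getD t []).getD b true then
          F.set t (omin (F.getD t none) (oadd (F.getD b none) |S.getD t 0 - S.getD b 0|))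
        else F) F with hF1
    have hFt : F.getD t none = none := hFhi t (le_refl t)
    have hF1t : F1.getD t none = pvG S t := by
      rw [i3, hFt]
      have htt : t - 1 + 1 = t := by omega
      rw [← htt, pvG_succ]
    have hF1lo : ∀ k, k < t + 1 → F1.getD k none = pvG S k := by
      intro k hk
      by_cases hkt : k = t
      · subst hkt; exact hF1t
      · rw [i2 k hkt]; exact hFlo k (by omega)
    have hF1hi : ∀ k, t + 1 ≤ k → F1.getD k none = none := by
      intro k hk
      rw [i2 k (by omega)]; exact hFhi k (by omega)
    have := ih (t + 1) (by omega) (by omega) F1 i1 hF1lo hF1hi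
    simpa [show t + 1 + cnt = t + (cnt + 1) by omega] using this

theorem replset_getD (n k : Nat) (v : Option Int) :
    ((List.replicate n (none : Option Int)).set 0 v).getD k none
      = if k = 0 ∧ 0 < n then v else none := by
  by_cases hk : k = 0
  · subst hk
    by_cases hn : 0 < n
    · rw [getD_set_self _ _ _ _ (by simpa using hn), if_pos ⟨rfl, hn⟩]
    · have : n = 0 := by omega
      subst this
      simp
  · rw [getD_set_ne _ _ _ _ _ hk, if_neg (by tauto)]
    by_cases hkn : k < n
    · exact List.getD_replicate _ hkn
    · rw [List.getD_eq_getElem?_getD, List.getElem?_eq_none (by simpa using by omega)]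
      rfl

theorem find_cost_eq_G (P : List Int) (h : P ≠ []) :
    find_cost P = (match pvG (PySem.List.sorted P (fun x => x)) ((PySem.List.sorted P (fun x => x)).length - 1) with
      | none => -1 | some v => v) := by
  simp only [find_cost]
  set S := PySem.List.sorted P (fun x => x) with hS
  have hSne : S ≠ [] := by
    rw [hS]
    intro h0
    exact h ((PySem.List.sorted_eq_nil_iff P (fun x => x) false).mp h0)
  have hn1 : 1 ≤ S.length := by
    have : S.length ≠ 0 := fun h0 => hSne (List.eq_nil_of_length_eq_zero h0)
    omega
  obtain ⟨o1, o2, o3⟩ := dpA_outer S S.length (pvFill S S.length)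
    (fun a b hb ha => pvFill_spec S S.length a b hb ha) (S.length - 1) 1 (le_refl 1) (by omega)
    ((List.replicate S.length (none : Option Int)).set 0 (some 0)) (by simp)
    (fun k hk => by
      rw [replset_getD, if_pos ⟨by omega, by omega⟩]
      have : k = 0 := by omega
      subst this
      rw [pvG])
    (fun k hk => by rw [replset_getD, if_neg (by omega)])
  rw [o2 (S.length - 1) (by omega)]

-- ---- B-side ----
def pvBest (S : List Int) (t : Nat) (d : Int) : Option Int :=
  (List.range t).foldl
    (fun acc b =>
      if d ∈ pvDigits (S.getD b 0) then omin acc (oadd (pvG S b) (-(S.getD b 0))) else acc) none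

-- ---- B-side: omin fold toolkit ----
theorem omin_swap (a b c : Option Int) : omin (omin a c) (omin b c) = omin (omin a b) c := by
  cases a <;> cases b <;> cases c <;> simp [omin] <;> omega

theorem foldl_min_some (vs : List Int) : ∀ (w : Int),
    vs.foldl (fun acc v => omin acc (some v)) (some w) = some (vs.foldl min w) := by
  induction vs with
  | nil => intro w; rfl
  | cons v vs ih => intro w; simp only [List.foldl_cons, omin]; exact ih _

theorem min?_eq_ominFold (vs : List Int) :
    PySem.List.min? vs (fun v => v) = vs.foldl (fun acc v => omin acc (some v)) none := by
  cases vs with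
  | nil => rfl
  | cons v vs =>
    rw [PySem.List.min?_id_cons]
    simp only [List.foldl_cons, omin_none_left]
    exact (foldl_min_some vs v).symm

theorem ominFold_filterMap (f : Int → Option Int) (l : List Int) : ∀ (init : Option Int),
    (l.filterMap f).foldl (fun acc v => omin acc (some v)) init
      = l.foldl (fun acc d => omin acc (f d)) init := by
  induction l with
  | nil => intro init; rfl
  | cons d l ih =>
    intro init
    cases hf : f d with
    | none => simp only [List.filterMap_cons, hf, List.foldl_cons, omin_none_right]; exact ih init
    | some v => simp only [List.filterMap_cons, hf, List.foldl_cons]; exact ih _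

theorem ominFold_update (l : List Int) (f : Int → Option Int) (p : Int → Prop) [DecidablePred p]
    (c : Option Int) :
    l.foldl (fun acc d => omin acc (if p d then omin (f d) c else f d)) none
      = if ∃ d ∈ l, p d then omin (l.foldl (fun acc d => omin acc (f d)) none) c
        else l.foldl (fun acc d => omin acc (f d)) none := by
  induction l with
  | nil => simp
  | cons d l ih =>
    simp only [List.foldl_cons, omin_none_left]
    rw [ominFold_init (fun d => if p d then omin (f d) c else f d) l,
      ominFold_init f l (f d), ih]
    by_cases hp : p d
    · rw [if_pos hp, if_pos (show ∃ x ∈ d :: l, p x from ⟨d, List.mem_cons_self, hp⟩)]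
      by_cases hl : ∃ x ∈ l, p x
      · rw [if_pos hl, omin_swap]
      · rw [if_neg hl, omin_assoc, omin_comm c _, ← omin_assoc]
    · rw [if_neg hp]
      by_cases hl : ∃ x ∈ l, p x
      · rw [if_pos hl, if_pos (by rcases hl with ⟨x, hx, hpx⟩; exact ⟨x, List.mem_cons_of_mem _ hx, hpx⟩),
          ← omin_assoc]
      · have hcon : ¬ ∃ x ∈ d :: l, p x := by
          rintro ⟨x, hx, hpx⟩
          rcases List.mem_cons.mp hx with rfl | hx'
          · exact hp hpx
          · exact hl ⟨x, hx', hpx⟩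
        rw [if_neg hl, if_neg hcon]

theorem oadd_oadd (a : Option Int) (c e : Int) : oadd (oadd a c) e = oadd a (c + e) := by
  cases a <;> simp [oadd] <;> ring

theorem oadd_foldl {α : Type} (l : List α) (q : α → Prop) [DecidablePred q] (g : α → Option Int)
    (c : Int) : ∀ (init : Option Int),
    oadd (l.foldl (fun acc b => if q b then omin acc (g b) else acc) init) c
      = l.foldl (fun acc b => if q b then omin acc (oadd (g b) c) else acc) (oadd init c) := by
  induction l with
  | nil => intro init; rfl
  | cons b l ih =>
    intro init
    simp only [List.foldl_cons]
    by_cases hq : q b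
    · rw [if_pos hq, if_pos hq, ih, oadd_omin]
    · rw [if_neg hq, if_neg hq, ih]

theorem getD_eq_getElem' (l : List Int) (i : Nat) (h : i < l.length) : l.getD i 0 = l[i] := by
  rw [List.getD_eq_getElem?_getD, List.getElem?_eq_getElem h]
  rfl

theorem pvBest_succ (S : List Int) (t : Nat) (d : Int) :
    pvBest S (t + 1) d
      = if d ∈ pvDigits (S.getD t 0) then
          omin (pvBest S t d) (oadd (pvG S t) (-(S.getD t 0)))
        else pvBest S t d := by
  unfold pvBest
  rw [List.range_succ, List.foldl_append, List.foldl_cons, List.foldl_nil]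

theorem pvL_eq_pvR (S : List Int) (a : Nat) : ∀ (t : Nat),
    (altDigits (S.getD a 0)).foldl (fun acc d => omin acc (pvBest S t d)) none
      = (List.range t).foldl (fun acc b =>
          if pvChecker (S.getD b 0) (S.getD a 0) = true then
            omin acc (oadd (pvG S b) (-(S.getD b 0)))
          else acc) none := by
  intro t
  induction t with
  | zero =>
    simp only [pvBest, List.range_zero, List.foldl_nil, omin_none_right]
    exact PySem.List.foldl_ignore _ _
  | succ t ih =>
    have hrw : (altDigits (S.getD a 0)).foldl (fun acc d => omin acc (pvBest S (t + 1) d)) none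
        = (altDigits (S.getD a 0)).foldl (fun acc d => omin acc
            (if d ∈ pvDigits (S.getD t 0) then
              omin (pvBest S t d) (oadd (pvG S t) (-(S.getD t 0)))
            else pvBest S t d)) none := by
      apply PySem.List.foldl_congr_mem
      intro acc d _
      rw [pvBest_succ]
    rw [hrw, ominFold_update _ (pvBest S t) (fun d => d ∈ pvDigits (S.getD t 0))
      (oadd (pvG S t) (-(S.getD t 0))), ih]
    rw [List.range_succ, List.foldl_append, List.foldl_cons, List.foldl_nil]
    have hcond : (∃ d ∈ altDigits (S.getD a 0), d ∈ pvDigits (S.getD t 0))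
        ↔ pvChecker (S.getD t 0) (S.getD a 0) = true := by
      rw [pvChecker_spec, decide_eq_true_eq]
      constructor
      · rintro ⟨d, hd1, hd2⟩
        exact ⟨d, hd2, (mem_altDigits _ _).mp hd1⟩
      · rintro ⟨d, hd1, hd2⟩
        exact ⟨d, (mem_altDigits _ _).mpr hd2, hd1⟩
    by_cases hchk : pvChecker (S.getD t 0) (S.getD a 0) = true
    · rw [if_pos (hcond.mpr hchk), if_pos hchk]
    · rw [if_neg (fun hx => hchk (hcond.mp hx)), if_neg hchk]

theorem exchange (S : List Int) (hs : S.Pairwise (· ≤ ·)) (a : Nat) (ha1 : 1 ≤ a)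
    (ha : a < S.length) :
    oadd ((altDigits (S.getD a 0)).foldl (fun acc d => omin acc (pvBest S a d)) none) (S.getD a 0)
      = pvG S a := by
  rw [pvL_eq_pvR S a a, oadd_foldl]
  obtain ⟨a', rfl⟩ : ∃ a', a = a' + 1 := ⟨a - 1, by omega⟩
  rw [pvG_succ]
  have hinit : oadd none (S.getD (a' + 1) 0) = none := rfl
  rw [hinit]
  apply PySem.List.foldl_congr_mem
  intro acc b hb
  have hba : b < a' + 1 := List.mem_range.mp hb
  have hle : S.getD b 0 ≤ S.getD (a' + 1) 0 := by
    rw [getD_eq_getElem' S b (by omega), getD_eq_getElem' S (a' + 1) (by omega)]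
    exact List.pairwise_iff_getElem.mp hs b (a' + 1) (by omega) (by omega) (by omega)
  by_cases hchk : pvChecker (S.getD b 0) (S.getD (a' + 1) 0) = true
  · rw [if_pos hchk, if_pos hchk, oadd_oadd,
      show -S.getD b 0 + S.getD (a' + 1) 0 = |S.getD (a' + 1) 0 - S.getD b 0| by
        rw [abs_of_nonneg (by omega)]; ring]
  · rw [if_neg hchk, if_neg hchk]

-- ---- B-side: the bucket dictionary ----
theorem altUpd_get_self (v : Int) (best : PySem.Dict Int Int) (d : Int) :
    (altUpd v best d).get? d = omin (best.get? d) (some v) := by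
  cases hbd : best.get? d with
  | none => simp only [altUpd, hbd, PySem.Dict.get?_insert_self]; rfl
  | some w =>
    by_cases hvw : v < w
    · simp only [altUpd, hbd, if_pos hvw, PySem.Dict.get?_insert_self, omin]
      congr 1
      omega
    · simp only [altUpd, hbd, if_neg hvw, omin]
      congr 1
      omega

theorem altUpd_get_ne (v : Int) (best : PySem.Dict Int Int) (d d' : Int) (h : d ≠ d') :
    (altUpd v best d').get? d = best.get? d := by
  cases hbd : best.get? d' with
  | none => simp only [altUpd, hbd]; exact PySem.Dict.get?_insert_of_ne _ _ h
  | some w =>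
    by_cases hvw : v < w
    · simp only [altUpd, hbd, if_pos hvw]; exact PySem.Dict.get?_insert_of_ne _ _ h
    · simp only [altUpd, hbd, if_neg hvw]

theorem dict_fold_upd (v : Int) (l : List Int) : ∀ (best : PySem.Dict Int Int) (d : Int),
    (l.foldl (altUpd v) best).get? d
      = if d ∈ l then omin (best.get? d) (some v) else best.get? d := by
  induction l with
  | nil => intro best d; simp
  | cons d' l ih =>
    intro best d
    simp only [List.foldl_cons, List.mem_cons]
    rw [ih]
    by_cases hdd : d = d'
    · subst hdd
      rw [altUpd_get_self]
      by_cases hdl : d ∈ l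
      · rw [if_pos hdl, if_pos (Or.inl rfl), omin_idem_right]
      · rw [if_neg hdl, if_pos (Or.inl rfl)]
    · rw [altUpd_get_ne _ _ _ _ hdd]
      by_cases hdl : d ∈ l
      · rw [if_pos hdl, if_pos (Or.inr hdl)]
      · rw [if_neg hdl, if_neg (by tauto)]

-- the loop body of find_cost_alt (definitionally equal to the zeta-reduced lambda of the port)
def pvStepB (st : PySem.Dict Int Int × Option Int) (ix : Int × Int) :
    PySem.Dict Int Int × Option Int :=
  match (if ix.1 = 0 then some 0
    else
      match PySem.List.min? (List.filterMap (fun d => st.1.get? d) (altDigits ix.2)) (fun v => v) with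
      | some m => some (m + ix.2)
      | none => none : Option Int) with
  | none => (st.1, none)
  | some f => (List.foldl (altUpd (f - ix.2)) st.1 (altDigits ix.2), some f)

theorem pvStepB_spec (S : List Int) (hs : S.Pairwise (· ≤ ·)) (t : Nat) (ht : 1 ≤ t)
    (htn : t < S.length) (best : PySem.Dict Int Int)
    (hbest : ∀ d, best.get? d = pvBest S t d) (prev : Option Int) :
    (pvStepB (best, prev) ((t : Int), S[t])).2 = pvG S t ∧
    (∀ d, (pvStepB (best, prev) ((t : Int), S[t])).1.get? d = pvBest S (t + 1) d) := by
  have ht0 : ¬ ((t : Int) = 0) := by omega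
  have hg : S.getD t 0 = S[t] := getD_eq_getElem' S t htn
  have hF : (if ((t : Int)) = 0 then some 0
      else
        match PySem.List.min? (List.filterMap (fun d => best.get? d) (altDigits S[t])) (fun v => v) with
        | some m => some (m + S[t])
        | none => none : Option Int) = pvG S t := by
    rw [if_neg ht0, show (fun d => best.get? d) = pvBest S t from funext hbest,
      min?_eq_ominFold, ominFold_filterMap, ← hg]
    have := exchange S hs t ht htn
    cases hL : (altDigits (S.getD t 0)).foldl (fun acc d => omin acc (pvBest S t d)) none with
    | none => rw [hL] at this; exact this
    | some m => rw [hL] at this; rw [← this]; rfl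
  constructor
  · show (pvStepB (best, prev) ((t : Int), S[t])).2 = pvG S t
    unfold pvStepB
    simp only []
    rw [hF]
    cases pvG S t <;> rfl
  · intro d
    unfold pvStepB
    simp only []
    rw [hF]
    cases hGt : pvG S t with
    | none =>
      simp only []
      rw [hbest d, pvBest_succ, hGt, oadd_none, omin_none_right, ite_self]
    | some f =>
      simp only []
      rw [dict_fold_upd, hbest d, pvBest_succ, hGt]
      have hmem : (d ∈ altDigits S[t]) ↔ (d ∈ pvDigits (S.getD t 0)) := by
        rw [hg]; exact mem_altDigits _ _
      by_cases hd : d ∈ pvDigits (S.getD t 0)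
      · rw [if_pos (hmem.mpr hd), if_pos hd, oadd_some,
          show f - S[t] = f + -(S.getD t 0) by rw [hg]; ring]
      · rw [if_neg (fun hx => hd (hmem.mp hx)), if_neg hd]

theorem Bsuffix (S : List Int) (hs : S.Pairwise (· ≤ ·)) : ∀ (cnt t : Nat), 1 ≤ t →
    t + cnt = S.length → ∀ best : PySem.Dict Int Int, (∀ d, best.get? d = pvBest S t d) →
    ((PySem.List.enumerate (S.drop t) (t : Int)).foldl pvStepB (best, pvG S (t - 1))).2
      = pvG S (S.length - 1) := by
  intro cnt
  induction cnt with
  | zero =>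
    intro t ht htn best hbest
    rw [List.drop_eq_nil_of_le (by omega), PySem.List.enumerate_nil, List.foldl_nil,
      show t - 1 = S.length - 1 by omega]
  | succ cnt ih =>
    intro t ht htn best hbest
    have htlt : t < S.length := by omega
    rw [List.drop_eq_getElem_cons htlt, PySem.List.enumerate_cons, List.foldl_cons]
    obtain ⟨h2, h1⟩ := pvStepB_spec S hs t ht htlt best hbest (pvG S (t - 1))
    have hst : pvStepB (best, pvG S (t - 1)) ((t : Int), S[t])
        = ((pvStepB (best, pvG S (t - 1)) ((t : Int), S[t])).1, pvG S ((t + 1) - 1)) := by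
      rw [show (t + 1) - 1 = t by omega]
      exact Prod.ext rfl h2
    rw [hst, show ((t : Int) + 1) = (((t + 1 : Nat)) : Int) by push_cast; ring]
    exact ih (t + 1) (by omega) (by omega) _ h1

theorem find_cost_alt_eq_G (P : List Int) (h : P ≠ []) :
    find_cost_alt P = (match pvG (PySem.List.sorted P (fun x => x)) ((PySem.List.sorted P (fun x => x)).length - 1) with
      | none => -1 | some v => v) := by
  simp only [find_cost_alt]
  change (match (List.foldl pvStepB ((PySem.Dict.empty : PySem.Dict Int Int), (none : Option Int))
      (PySem.List.enumerate (PySem.List.sorted P fun x => x) 0)).2 with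
    | none => -1
    | some v => v) = _
  set S := PySem.List.sorted P (fun x => x) with hS
  have hs : S.Pairwise (· ≤ ·) := PySem.List.sorted_pairwise P (fun x => x)
  have hSne : S ≠ [] := by
    rw [hS]
    intro h0
    exact h ((PySem.List.sorted_eq_nil_iff P (fun x => x) false).mp h0)
  have hn1 : 1 ≤ S.length := by
    have : S.length ≠ 0 := fun h0 => hSne (List.eq_nil_of_length_eq_zero h0)
    omega
  have hcons : S = S[0] :: S.drop 1 := by
    have h0 := List.drop_eq_getElem_cons (l := S) (i := 0) (by omega)
    rwa [List.drop_zero] at h0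
  conv_lhs => rw [hcons]
  rw [PySem.List.enumerate_cons, List.foldl_cons]
  have hstep : pvStepB ((PySem.Dict.empty : PySem.Dict Int Int), (none : Option Int)) ((0 : Int), S[0])
      = ((altDigits S[0]).foldl (altUpd (0 - S[0])) PySem.Dict.empty, some 0) := rfl
  have hbest1 : ∀ d, ((altDigits S[0]).foldl (altUpd (0 - S[0])) PySem.Dict.empty).get? d
      = pvBest S 1 d := by
    intro d
    rw [dict_fold_upd, PySem.Dict.get?_empty,
      show (1 : Nat) = 0 + 1 from rfl, pvBest_succ,
      show pvBest S 0 d = none from rfl,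
      show pvG S 0 = some 0 from by rw [pvG], oadd_some]
    have hmem : (d ∈ altDigits S[0]) ↔ (d ∈ pvDigits (S.getD 0 0)) := by
      rw [getD_eq_getElem' S 0 (by omega)]
      exact mem_altDigits _ _
    by_cases hd : d ∈ pvDigits (S.getD 0 0)
    · rw [if_pos (hmem.mpr hd), if_pos hd]
      simp only [omin_none_left]
      congr 1
      rw [getD_eq_getElem' S 0 (by omega)]
      push_cast
      omega
    · rw [if_neg (fun hx => hd (hmem.mp hx)), if_neg hd]
  have hG0 : (some (0 : Int) : Option Int) = pvG S (1 - 1) := by rw [pvG]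
  rw [hstep, hG0, show ((0 : Int) + 1) = ((1 : Nat) : Int) by norm_num]
  rw [Bsuffix S hs (S.length - 1) 1 (le_refl 1) (by omega) _ hbest1]

-- ===== VERDICT (by name: the statement is the Claim_ definition above) =====
theorem find_cost_spec : Claim_equal_find_cost := by
  intro P _ hP
  unfold Spec_find_cost
  rw [find_cost_eq_G P hP, find_cost_alt_eq_G P hP]

theorem find_cost_raises : Claim_raises_find_cost := by
  unfold Claim_raises_find_cost
  exact ⟨fun P _ hR hne => hne hR, by decide⟩

-- witness self-check: the raise-region witness facts, read off the proved claim
theorem pvRaiseWitness_ok : Raises_find_cost pvRaiseWitness_find_cost ∧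
    find_cost_alt pvRaiseWitness_find_cost = pvRaiseWitnessOut_find_cost := by
  have h := find_cost_raises
  unfold Claim_raises_find_cost at h
  exact ⟨h.2.2.1, h.2.2.2⟩
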